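-- pv_equiv track=rewrite | github.com/YBoiku/Python_basic_Hillel | homework_9.py | for_reverse_odd_string
-- ===== SOURCE A (Python) =====
-- def for_reverse_odd_string(original_strings_list):
--     reversed_string = []
--     for index_string, string_value in enumerate(original_strings_list):
--         if index_string % 2 != 0:
--             reversed_string.append(original_strings_list[index_string])
--         else:
--             reversed_company = original_strings_list[index_string][::-1]
--             reversed_string.append(reversed_company)
--     return reversed_string
-- ===== SOURCE B (Python) =====
-- def for_reverse_odd_string(original_strings_list):
--     result = [None] * len(original_strings_list)
--     result[0::2] = [s[::-1] for s in original_strings_list[0::2]]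
--     result[1::2] = original_strings_list[1::2]
--     return result
-- ===== Notes on version B (the rewrite author's own statement) =====
-- stated objective: alternative
-- what changed: Replaces the sequential enumerate loop with a per-element parity test by partitioning the list into two stride-2 slices (evens reversed, odds copied) and reassembling them with slice assignment into a fresh list.
import Mathlib
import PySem

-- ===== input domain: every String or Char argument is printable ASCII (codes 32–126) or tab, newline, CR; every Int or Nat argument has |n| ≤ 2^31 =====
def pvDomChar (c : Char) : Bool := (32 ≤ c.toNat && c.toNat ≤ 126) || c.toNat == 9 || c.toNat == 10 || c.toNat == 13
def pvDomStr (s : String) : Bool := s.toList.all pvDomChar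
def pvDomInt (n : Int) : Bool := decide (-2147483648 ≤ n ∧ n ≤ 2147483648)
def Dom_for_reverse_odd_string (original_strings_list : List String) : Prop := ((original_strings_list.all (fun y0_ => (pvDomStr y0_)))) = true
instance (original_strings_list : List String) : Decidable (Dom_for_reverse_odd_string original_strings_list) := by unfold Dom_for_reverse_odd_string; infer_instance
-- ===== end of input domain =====

-- B reassembles the result from two stride-2 slices (evens reversed, odds copied) instead of
-- A's sequential enumerate loop with a per-element parity test; same cost, different traversal.

-- ===== PORT A =====
-- literal port of A: fold over enumerate, appending one element per step;
-- s[::-1] is PySem.Str.slice? s none none (-1) (always some on a string).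
def for_reverse_odd_string (original_strings_list : List String) : List String :=
  (PySem.List.enumerate original_strings_list 0).foldl
    (fun reversed_string p =>
      if PySem.Int.mod p.1 2 ≠ 0 then
        reversed_string ++ [(PySem.List.pyGet? original_strings_list p.1).getD ""]
      else
        reversed_string ++
          [(PySem.Str.slice? ((PySem.List.pyGet? original_strings_list p.1).getD "") none none (-1)).getD ""])
    []

-- ===== PORT B =====
-- pvEveryOther xs = xs[0::2]  (exact port of a stride-2 slice from index 0)
def pvEveryOther {α : Type} : List α → List α
  | [] => []
  | [a] => [a]
  | a :: _ :: rest => a :: pvEveryOther rest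

-- pvInterleave e o = the fresh list r with r[0::2] = e, r[1::2] = o
-- (exact port of the two slice assignments, which here have matching lengths).
def pvInterleave {α : Type} : List α → List α → List α
  | [], o => o
  | x :: e, o => x :: pvInterleave o e
termination_by e o => e.length + o.length

def for_reverse_odd_string_alt (original_strings_list : List String) : List String :=
  pvInterleave
    ((pvEveryOther original_strings_list).map (fun s => String.ofList s.toList.reverse))
    (pvEveryOther original_strings_list.tail)

-- ===== PRECONDITION & SPEC =====
def Spec_for_reverse_odd_string (original_strings_list : List String) (out : List String) : Prop := out = for_reverse_odd_string_alt original_strings_list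
instance (original_strings_list : List String) (out : List String) : Decidable (Spec_for_reverse_odd_string original_strings_list out) := by unfold Spec_for_reverse_odd_string; infer_instance

-- ===== CLAIM (what is proved, stated in full; the proofs are below) =====
def Claim_equal_for_reverse_odd_string : Prop := ∀ (original_strings_list : List String), Dom_for_reverse_odd_string original_strings_list → Spec_for_reverse_odd_string original_strings_list (for_reverse_odd_string original_strings_list)

-- ===== LEMMAS AND PROOFS =====

theorem pvEveryOther_cons {α : Type} (b : α) (l : List α) :
    pvEveryOther (b :: l) = b :: pvEveryOther l.tail := by
  cases l <;> simp [pvEveryOther]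

-- the fold of A is a map over the enumeration, and the looked-up element is the paired one
theorem portA_eq_map (xs : List String) :
    for_reverse_odd_string xs =
      (PySem.List.enumerate xs 0).map
        (fun p => if PySem.Int.mod p.1 2 ≠ 0 then p.2 else String.ofList p.2.toList.reverse) := by
  unfold for_reverse_odd_string
  have h : (fun (reversed_string : List String) (p : Int × String) =>
      if PySem.Int.mod p.1 2 ≠ 0 then reversed_string ++ [(PySem.List.pyGet? xs p.1).getD ""]
      else reversed_string ++
        [(PySem.Str.slice? ((PySem.List.pyGet? xs p.1).getD "") none none (-1)).getD ""])
    = (fun (reversed_string : List String) (p : Int × String) => reversed_string ++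
        [if PySem.Int.mod p.1 2 ≠ 0 then (PySem.List.pyGet? xs p.1).getD ""
         else (PySem.Str.slice? ((PySem.List.pyGet? xs p.1).getD "") none none (-1)).getD ""]) := by
    funext acc p; split_ifs <;> rfl
  rw [h, PySem.List.foldl_append_singleton_eq_map]
  apply List.map_congr_left
  intro p hp
  rcases (PySem.List.mem_enumerate_iff _ _ _).1 hp with ⟨k, hk, rfl⟩
  simp [hk, PySem.Str.slice?_none_none_neg_one]

theorem key (xs : List String) : ∀ (s : Int), PySem.Int.mod s 2 = 0 →
    (PySem.List.enumerate xs s).map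
        (fun p => if PySem.Int.mod p.1 2 ≠ 0 then p.2 else String.ofList p.2.toList.reverse)
      = pvInterleave ((pvEveryOther xs).map (fun t => String.ofList t.toList.reverse))
          (pvEveryOther xs.tail) := by
  induction xs using pvEveryOther.induct with
  | case1 =>
      intro s _; simp [PySem.List.enumerate_nil, pvEveryOther, pvInterleave]
  | case2 a =>
      intro s hs
      rw [PySem.Int.mod_eq_emod_of_pos (by omega)] at hs
      simp [PySem.List.enumerate_cons, PySem.List.enumerate_nil, pvEveryOther, pvInterleave]
      intro h; omega
  | case3 a b rest ih =>
      intro s hs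
      rw [PySem.Int.mod_eq_emod_of_pos (by omega)] at hs
      have h0 : ¬ PySem.Int.mod s 2 ≠ 0 := by
        rw [PySem.Int.mod_eq_emod_of_pos (by omega)]; omega
      have h1 : PySem.Int.mod (s + 1) 2 ≠ 0 := by
        rw [PySem.Int.mod_eq_emod_of_pos (by omega)]; omega
      have h2 : PySem.Int.mod (s + 1 + 1) 2 = 0 := by
        rw [PySem.Int.mod_eq_emod_of_pos (by omega)]; omega
      rw [PySem.List.enumerate_cons, PySem.List.enumerate_cons, List.map_cons, List.map_cons,
        ih (s + 1 + 1) h2]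
      simp only [h0, h1, ite_not]
      rw [show pvEveryOther (a :: b :: rest) = a :: pvEveryOther rest from rfl,
        List.tail_cons, pvEveryOther_cons]
      simp [pvInterleave]

-- ===== VERDICT (by name: the statement is the Claim_ definition above) =====
theorem for_reverse_odd_string_spec : Claim_equal_for_reverse_odd_string := by
  intro xs _
  unfold Spec_for_reverse_odd_string for_reverse_odd_string_alt
  rw [portA_eq_map]
  exact key xs 0 (by decide)
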